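-- pv_equiv track=rewrite | github.com/Dimitrije-Jimmy/AdventOfCode2024 | day17/main7.2.py | backward_solve_from_end
-- ===== SOURCE A (Python) =====
-- def f(A):
--     # Given function:
--     # B = (A mod 8) xor 2
--     # C = A >> B
--     # return (B xor C xor 3) mod 8
--     B = (A % 8) ^ 2
--     C = A >> B
--     return (B ^ C ^ 3) % 8
--
-- def backward_solve_from_end(outputs):
--     """
--     Given the full output sequence (from first to last),
--     we will start from the LAST output and go backward.
--
--     Steps:
--     - At the end of the program, A=0.
--     - For the last output out_last, find all 10-bit A's that produce out_last.
--     - Those represent A before the last iteration ran. But we must now 'reverse' the shift: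
--       forward: A_next = A_prev >> 3
--       backward: A_prev = (A_next << 3) + x, for x in [0..7]
--     - Repeat this for each previous output.
--
--     After processing all outputs backward, we get a set of possible initial A values.
--     One of them should match the known solution if it exists.
--     """
--
--     # We'll proceed backward in outputs:
--     # Start from A=0 at the end: This doesn't directly tell us A before last iteration.
--     # Instead, we know that for the last output out_n: f(A_before_last) = out_n.
--     # A_before_last must be a 10-bit number that gives out_n when f(A_before_last) is called.
--
--     reversed_outputs = outputs[::-1]
--
--     # Start with a single candidate set: after no iterations backward, we know A_final = 0.
--     # But we actually need to find A_before_last iteration.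
--     # Let's call current_set the set of A candidates at the current stage of backward reasoning.
--
--     # For the last output (reversed_outputs[0]), we must find 10-bit numbers that produce it.
--     last_out = reversed_outputs[0]
--     current_set = []
--     for a_candidate in range(1024): # 10-bit search
--         if f(a_candidate) == last_out:
--             current_set.append(a_candidate)
--
--     bit_length = 10
--
--     # Now go through each preceding output:
--     # Each step:
--     # current_set represents A BEFORE the current iteration we are processing backward.
--     # We need to incorporate 3 more bits to undo the right shift by 3.
--     # For each candidate in current_set:
--     #   previous_A_candidates = []
--     #   for each candidate c:
--     #       for x in [0..7]:
--     #           prev_A = (c << 3) + x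
--     #           if f(prev_A) == next_out:
--     #               keep prev_A
--     #   current_set = new filtered set
--     for i in range(1, len(reversed_outputs)):
--         next_out = reversed_outputs[i]
--         new_set = []
--         bit_length += 3
--
--         base_candidates = current_set
--         current_set = []  # we'll rebuild it
--         for c in base_candidates:
--             # Undo the shift: prev_A = (c << 3) + x
--             base = c << 3
--             for x in range(8):
--                 candidate = base + x
--                 if f(candidate) == next_out:
--                     new_set.append(candidate)
--
--         current_set = new_set
--         if not current_set:
--             # No candidates match at this stage, no solution
--             return []
--
--     # After finishing all outputs, current_set contains possible initial A values.
--     return current_set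
-- ===== SOURCE B (Python) =====
-- def f(A):
--     B = (A % 8) ^ 2
--     C = A >> B
--     return (B ^ C ^ 3) % 8
--
-- def backward_solve_from_end(outputs):
--     # Recursive depth-first backtracking over the reversed outputs instead of
--     # rebuilding a whole candidate set per level.
--     rev = outputs[::-1]
--     first = rev[0]
--     def solve(targets, a):
--         # a already satisfies the earlier (later-in-time) outputs; targets are
--         # the remaining reversed outputs to satisfy.
--         if not targets:
--             return [a]
--         res = []
--         for x in range(8):
--             cand = a * 8 + x
--             if f(cand) == targets[0]:
--                 res.extend(solve(targets[1:], cand))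
--         return res
--     result = []
--     for a in range(1024):
--         if f(a) == first:
--             result.extend(solve(rev[1:], a))
--     return result
-- ===== Notes on version B (the rewrite author's own statement) =====
-- stated objective: alternative
-- what changed: Replaced the level-by-level candidate-set rebuild (iterative BFS over layers with an early-empty return) by a recursive depth-first backtracking search over the reversed outputs that extends one candidate at a time; same cost, no per-level set materialisation.
import Mathlib
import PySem

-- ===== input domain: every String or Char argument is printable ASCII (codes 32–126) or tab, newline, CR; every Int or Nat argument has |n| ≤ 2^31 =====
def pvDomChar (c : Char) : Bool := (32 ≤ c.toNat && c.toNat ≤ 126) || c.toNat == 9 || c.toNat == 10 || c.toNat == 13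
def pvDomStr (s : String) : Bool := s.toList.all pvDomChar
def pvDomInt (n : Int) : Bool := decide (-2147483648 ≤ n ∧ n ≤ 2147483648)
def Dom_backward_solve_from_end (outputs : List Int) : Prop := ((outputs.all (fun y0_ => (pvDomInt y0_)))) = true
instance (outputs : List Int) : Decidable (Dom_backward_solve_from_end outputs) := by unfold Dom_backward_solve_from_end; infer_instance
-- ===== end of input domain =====

-- B is a recursive depth-first backtracking search over the reversed outputs instead of A's
-- iterative layer-by-layer candidate-set rebuild; same results in the same order, similar cost.

-- ===== PORT A =====
-- helper f, shared verbatim by both Python files.  b = (a%8)^2 is always in 0..7 (PySem.Int.mod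
-- with positive divisor is nonnegative), so the Python shift 'a >> b' is Lean's 'a >>> b.toNat'.
def pvF (a : Int) : Int :=
  let b : Int := PySem.Int.bxor (PySem.Int.mod a 8) 2
  let c : Int := a >>> b.toNat
  PySem.Int.mod (PySem.Int.bxor (PySem.Int.bxor b c) 3) 8

-- inner double loop: for c in base_candidates: for x in range(8): if f(c<<3+x)==next: new_set.append
def pvAStep (next : Int) (cur : List Int) : List Int :=
  cur.foldl (fun ns c =>
    let base : Int := (c : Int) <<< (3 : Nat)   -- base = c << 3
    (PySem.List.pyRange 0 8 1).foldl (fun ns2 x =>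
      if pvF (base + x) = next then ns2 ++ [base + x] else ns2) ns) []

-- the 'for i in range(1, len(reversed_outputs))' loop with its early 'return []'
def pvALoop : List Int → List Int → List Int
  | [], cur => cur
  | next :: rest, cur =>
      let newSet := pvAStep next cur
      if newSet = [] then [] else pvALoop rest newSet

def backward_solve_from_end (outputs : List Int) : List Int :=
  let rev := outputs.reverse        -- outputs[::-1]  (PySem.List.slice?_none_none_neg_one)
  match PySem.List.pyGet? rev 0 with -- reversed_outputs[0]: IndexError on [] (excluded by Pre_)
  | none => []
  | some lastOut =>
      let init := (PySem.List.pyRange 0 1024 1).foldl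
        (fun acc a => if pvF a = lastOut then acc ++ [a] else acc) []
      pvALoop rev.tail init

-- ===== PORT B =====
-- f as defined in Source B is the same function pvF.
-- solve(targets, a): recursion on the remaining reversed outputs; inner 'for x in range(8)' loop.
mutual
def pvBSolve : List Int → Int → List Int
  | [], a => [a]
  | t :: ts, a => pvBInner ts t a (PySem.List.pyRange 0 8 1)
  termination_by ts _ => (ts.length + 1, 0)
def pvBInner (ts : List Int) (t : Int) (a : Int) : List Int → List Int
  | [] => []
  | x :: xs => (if pvF (a * 8 + x) = t then pvBSolve ts (a * 8 + x) else []) ++ pvBInner ts t a xs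
  termination_by xs => (ts.length + 1, xs.length + 1)
end

-- the top-level 'for a in range(1024)' loop
def pvBTop (rest : List Int) (first : Int) : List Int → List Int
  | [] => []
  | a :: as => (if pvF a = first then pvBSolve rest a else []) ++ pvBTop rest first as

def backward_solve_from_end_alt (outputs : List Int) : List Int :=
  match outputs.reverse with        -- rev = outputs[::-1]; rev[0] raises IndexError on []
  | [] => []
  | first :: rest => pvBTop rest first (PySem.List.pyRange 0 1024 1)

-- ===== PRECONDITION & SPEC =====
-- Pre_ excludes only the empty list, on which both Pythons raise IndexError (reversed_outputs[0]).
def Pre_backward_solve_from_end (outputs : List Int) : Prop := outputs ≠ []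
instance (outputs : List Int) : Decidable (Pre_backward_solve_from_end outputs) := by
  unfold Pre_backward_solve_from_end; infer_instance
def pvWitness_backward_solve_from_end : List Int := [3]

def Spec_backward_solve_from_end (outputs : List Int) (out : List Int) : Prop := out = backward_solve_from_end_alt outputs
instance (outputs : List Int) (out : List Int) : Decidable (Spec_backward_solve_from_end outputs out) := by unfold Spec_backward_solve_from_end; infer_instance

-- ===== CLAIM (what is proved, stated in full; the proofs are below) =====
def Claim_equal_backward_solve_from_end : Prop := ∀ (outputs : List Int), Dom_backward_solve_from_end outputs → Pre_backward_solve_from_end outputs → Spec_backward_solve_from_end outputs (backward_solve_from_end outputs)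

-- ===== LEMMAS AND PROOFS =====

-- proof-only helper: the kept children of candidate c for target t, as a filterMap
def pvKids (t c : Int) : List Int :=
  (PySem.List.pyRange 0 8 1).filterMap (fun x => if pvF (c * 8 + x) = t then some (c * 8 + x) else none)

-- B's inner loop is the DFS flatMap over the kept children
lemma pvBInner_eq (ts : List Int) (t a : Int) :
    ∀ xs : List Int,
      pvBInner ts t a xs =
        (xs.filterMap (fun x => if pvF (a * 8 + x) = t then some (a * 8 + x) else none)).flatMap
          (pvBSolve ts)
  | [] => by simp [pvBInner]
  | x :: xs => by
      by_cases h : pvF (a * 8 + x) = t <;>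
        simp [pvBInner, h, pvBInner_eq ts t a xs]

-- A's inner double loop, with its accumulator made explicit
lemma pvAStep_foldl (next : Int) :
    ∀ (cur ns0 : List Int),
      cur.foldl (fun ns c =>
        let base : Int := (c : Int) <<< (3 : Nat)
        (PySem.List.pyRange 0 8 1).foldl (fun ns2 x =>
          if pvF (base + x) = next then ns2 ++ [base + x] else ns2) ns) ns0
      = ns0 ++ cur.flatMap (pvKids next)
  | [], ns0 => by simp
  | c :: cur, ns0 => by
      have hbase : (c : Int) <<< (3 : Nat) = c * 8 := by rw [Int.shiftLeft_eq]; norm_num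
      have hinner : ∀ (ys ns : List Int),
          ys.foldl (fun ns2 x => if pvF (c * 8 + x) = next then ns2 ++ [c * 8 + x] else ns2) ns
          = ns ++ ys.filterMap (fun x => if pvF (c * 8 + x) = next then some (c * 8 + x) else none) := by
        intro ys
        induction ys with
        | nil => simp
        | cons y ys ih =>
            intro ns
            by_cases h : pvF (c * 8 + y) = next <;> simp [h, ih]
      simp only [List.foldl_cons, List.flatMap_cons, hbase, hinner,
        pvAStep_foldl next cur]
      simp [pvKids, List.append_assoc]

lemma pvAStep_eq (next : Int) (cur : List Int) :
    pvAStep next cur = cur.flatMap (pvKids next) := by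
  simpa using pvAStep_foldl next cur []

-- B's DFS on one more target, through the kept children
lemma pvBSolve_cons (next : Int) (rest : List Int) (c : Int) :
    pvBSolve (next :: rest) c = (pvKids next c).flatMap (pvBSolve rest) := by
  rw [pvBSolve, pvBInner_eq]
  rfl

-- main invariant: A's layer loop equals the DFS flatMap over the current candidate set
lemma pvALoop_eq : ∀ (rest cur : List Int), pvALoop rest cur = cur.flatMap (pvBSolve rest)
  | [], cur => by
      have h : pvBSolve ([] : List Int) = fun a : Int => [a] := funext fun a => by rw [pvBSolve]
      rw [pvALoop, h, List.flatMap_singleton']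
  | next :: rest, cur => by
      have hstep :
          cur.flatMap (pvBSolve (next :: rest)) = (pvAStep next cur).flatMap (pvBSolve rest) := by
        rw [show pvBSolve (next :: rest) = fun c => (pvKids next c).flatMap (pvBSolve rest) from
          funext (pvBSolve_cons next rest), pvAStep_eq, List.flatMap_assoc]
      rw [pvALoop, hstep]
      by_cases h : pvAStep next cur = []
      · simp [h]
      · simp [h, pvALoop_eq rest (pvAStep next cur)]

-- B's top-level 1024 scan, as seeds-then-DFS
lemma pvBTop_eq (rest : List Int) (first : Int) :
    ∀ cs : List Int,
      pvBTop rest first cs =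
        (cs.filterMap (fun a => if pvF a = first then some a else none)).flatMap (pvBSolve rest)
  | [] => by simp [pvBTop]
  | a :: cs => by
      by_cases h : pvF a = first <;> simp [pvBTop, h, pvBTop_eq rest first cs]

-- A's initial 1024 scan, as the same seeds
lemma pvInit_eq (lastOut : Int) :
    ∀ (cs acc : List Int),
      cs.foldl (fun acc a => if pvF a = lastOut then acc ++ [a] else acc) acc
      = acc ++ cs.filterMap (fun a => if pvF a = lastOut then some a else none)
  | [], acc => by simp
  | a :: cs, acc => by
      by_cases h : pvF a = lastOut <;> simp [h, pvInit_eq lastOut cs]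

-- ===== VERDICT (by name: the statement is the Claim_ definition above) =====
theorem backward_solve_from_end_spec : Claim_equal_backward_solve_from_end := by
  intro outputs _ hpre
  unfold Spec_backward_solve_from_end backward_solve_from_end backward_solve_from_end_alt
  have hrev : outputs.reverse ≠ [] := by simpa using hpre
  obtain ⟨first, rest, hfr⟩ := List.exists_cons_of_ne_nil hrev
  rw [hfr]
  simp only [PySem.List.pyGet?_zero_cons, List.tail_cons]
  rw [pvInit_eq, pvALoop_eq, pvBTop_eq]
  simp
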